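-- pv_equiv track=rewrite | github.com/shiva-aditya/codemind-python | Maximum_element_in_each_column.py | po
-- ===== SOURCE A (Python) =====
-- def po(a,r,c):
--     f=[]
--     for i in range(c):
--         t=[]
--         while i<len(a):
--             t.append(a[i])
--             i+=c
--         f.append(max(t))
--     return f
-- ===== SOURCE B (Python) =====
-- def po(a, r, c):
--     if c <= 0:
--         return []
--     best = {}
--     for i, v in enumerate(a):
--         j = i % c
--         if j not in best or v > best[j]:
--             best[j] = v
--     return [best[j] for j in range(c)]
-- ===== Notes on version B (the rewrite author's own statement) =====
-- stated objective: alternative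
-- what changed: Replaces the per-column gather (for each column index, a strided inner while-loop over the list, then max of the gathered sublist) by a single row-major pass that keeps a dict of running per-column maxima, read out once at the end.
import Mathlib
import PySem

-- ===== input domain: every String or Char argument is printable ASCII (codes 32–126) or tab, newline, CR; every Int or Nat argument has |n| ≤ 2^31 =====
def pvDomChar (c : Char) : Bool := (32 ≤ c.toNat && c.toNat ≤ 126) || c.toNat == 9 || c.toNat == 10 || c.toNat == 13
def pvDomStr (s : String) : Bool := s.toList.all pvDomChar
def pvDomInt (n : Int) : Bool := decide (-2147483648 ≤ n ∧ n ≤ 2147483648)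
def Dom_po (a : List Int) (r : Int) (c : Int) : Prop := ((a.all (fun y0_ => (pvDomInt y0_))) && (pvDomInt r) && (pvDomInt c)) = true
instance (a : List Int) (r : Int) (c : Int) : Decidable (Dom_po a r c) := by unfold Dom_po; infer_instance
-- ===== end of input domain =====

-- B replaces A's per-column strided gather-then-max by one row-major pass keeping a dict of running
-- per-column maxima (objective: alternative; same asymptotic cost, different traversal).

-- ===== PORT A =====
-- inner loop 'while i < len(a): t.append(a[i]); i += c' as fuel recursion; it is only reached with
-- 0 ≤ i < c (i from range(c)), so fuel = len(a)+1 bounds its iteration count; 'max(t)' with empty t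
-- is Python's ValueError (the 'none' of max?), excluded by Pre_po, rendered as 0 to stay total.
def poCollect : Nat → List Int → Int → Int → List Int
  | 0, _, _, _ => []
  | fuel+1, a, c, i =>
    if i < (a.length : Int) then
      ((PySem.List.pyGet? a i).getD 0) :: poCollect fuel a c (i + c)
    else []

def po (a : List Int) (r : Int) (c : Int) : List Int :=
  (PySem.List.pyRange 0 c 1).foldl
    (fun f i => f ++ [(PySem.List.max? (poCollect (a.length + 1) a c i) (fun y => y)).getD 0]) []

-- ===== PORT B =====
-- 'if j not in best or v > best[j]: best[j] = v'
def poStep (c : Int) (d : PySem.Dict Int Int) (p : Int × Int) : PySem.Dict Int Int :=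
  match d.get? (PySem.Int.mod p.1 c) with
  | none => d.insert (PySem.Int.mod p.1 c) p.2
  | some w => if w < p.2 then d.insert (PySem.Int.mod p.1 c) p.2 else d

-- 'best[j]' on a missing key is Python's KeyError (the 'none' of get?), excluded by Pre_po,
-- rendered as 0 to stay total.
def po_alt (a : List Int) (r : Int) (c : Int) : List Int :=
  if c ≤ 0 then []
  else
    let best := (PySem.List.enumerate a 0).foldl (poStep c) PySem.Dict.empty
    (PySem.List.pyRange 0 c 1).map (fun j => (best.get? j).getD 0)

-- ===== PRECONDITION & SPEC =====
-- Pre_po excludes exactly the inputs where A raises (ValueError from max([]) when 0 < c and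
-- len(a) < c, i.e. some column is empty); B raises there too (KeyError).
def Pre_po (a : List Int) (r : Int) (c : Int) : Prop := c ≤ 0 ∨ c ≤ (a.length : Int)
instance (a : List Int) (r : Int) (c : Int) : Decidable (Pre_po a r c) := by unfold Pre_po; infer_instance

def pvWitness_po : List Int × Int × Int := ([3, 1, 2, 5], 2, 2)

def Spec_po (a : List Int) (r : Int) (c : Int) (out : List Int) : Prop := out = po_alt a r c
instance (a : List Int) (r : Int) (c : Int) (out : List Int) : Decidable (Spec_po a r c out) := by unfold Spec_po; infer_instance

-- ===== CLAIM (what is proved, stated in full; the proofs are below) =====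
def Claim_equal_po : Prop := ∀ (a : List Int) (r : Int) (c : Int), Dom_po a r c → Pre_po a r c → Spec_po a r c (po a r c)

-- ===== LEMMAS AND PROOFS =====

-- the sublist of xs (whose first element has global index s) at positions ≡ j (mod c)
def colc (c : Int) : List Int → Int → Int → List Int
  | [], _, _ => []
  | x :: xs, s, j => if PySem.Int.mod s c = j then x :: colc c xs (s + 1) j else colc c xs (s + 1) j

-- running maximum as an option
def runmax : Option Int → List Int → Option Int
  | o, [] => o
  | none, x :: xs => runmax (some x) xs
  | some w, x :: xs => runmax (some (max w x)) xs

theorem runmax_some (t : List Int) : ∀ w : Int, runmax (some w) t = some (t.foldl max w) := by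
  induction t with
  | nil => intro w; rfl
  | cons x xs ih => intro w; simp [runmax, List.foldl, ih]

theorem runmax_eq_max? (L : List Int) :
    runmax none L = PySem.List.max? L (fun y => y) := by
  cases L with
  | nil => rfl
  | cons x t => simp [runmax, runmax_some, PySem.List.max?_id_cons]

-- dict-fold invariant for B's single pass
theorem dict_invariant (c : Int) (xs : List Int) : ∀ (s : Int) (d : PySem.Dict Int Int) (j : Int),
    ((PySem.List.enumerate xs s).foldl (poStep c) d).get? j = runmax (d.get? j) (colc c xs s j) := by
  induction xs with
  | nil => intro s d j; simp [PySem.List.enumerate_nil, colc, runmax]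
  | cons x xs ih =>
    intro s d j
    rw [PySem.List.enumerate_cons]
    simp only [List.foldl_cons]
    rw [ih]
    by_cases h : PySem.Int.mod s c = j
    · have hstep : (poStep c d (s, x)).get? j =
          some ((d.get? j).elim x (fun w => max w x)) := by
        unfold poStep
        simp only [h]
        cases hd : d.get? j with
        | none => simp [PySem.Dict.get?_insert_self]
        | some w =>
          by_cases hw : w < x
          · simp [hw, PySem.Dict.get?_insert_self, Option.elim, max_eq_right hw.le]
          · simp [hd, hw, Option.elim, max_eq_left (le_of_not_gt hw)]
      rw [hstep]
      simp only [colc, if_pos h]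
      cases hd : d.get? j with
      | none => simp [runmax, Option.elim]
      | some w => simp [runmax, Option.elim]
    · have hstep : (poStep c d (s, x)).get? j = d.get? j := by
        unfold poStep
        cases hd : d.get? (PySem.Int.mod s c) with
        | none => simp [PySem.Dict.get?_insert_of_ne _ _ (fun he => h he.symm)]
        | some w =>
          by_cases hw : w < x
          · simp [hw, PySem.Dict.get?_insert_of_ne _ _ (fun he => h he.symm)]
          · simp [hw]
      rw [hstep, colc, if_neg h]

-- first index ≥ s congruent to j modulo c
def nxt (c s j : Int) : Int := s + PySem.Int.mod (j - s) c

theorem poCollect_ge (fuel : Nat) (a : List Int) (c i : Int) (h : (a.length : Int) ≤ i) :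
    poCollect fuel a c i = [] := by
  cases fuel with
  | zero => rfl
  | succ f => simp [poCollect, not_lt.mpr h]

theorem bridge (a : List Int) (c j : Int) (hc : 0 < c) (hj0 : 0 ≤ j) (hjc : j < c) :
    ∀ (xs : List Int) (s : Int) (fuel : Nat), 0 ≤ s → xs = a.drop s.toNat →
      (a.length : Int) ≤ s + fuel →
      colc c xs s j = poCollect fuel a c (nxt c s j) := by
  intro xs
  induction xs with
  | nil =>
    intro s fuel hs hdrop hfuel
    have hlen : a.length ≤ s.toNat := by
      have := congrArg List.length hdrop
      simp [List.length_drop] at this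
      omega
    have hmn : 0 ≤ PySem.Int.mod (j - s) c := PySem.Int.mod_nonneg _ hc
    rw [colc, poCollect_ge]
    unfold nxt; omega
  | cons x xs ih =>
    intro s fuel hs hdrop hfuel
    have hsl : s.toNat < a.length := by
      by_contra hge
      rw [List.drop_eq_nil_of_le (by omega)] at hdrop
      simp at hdrop
    have hsl' : s < (a.length : Int) := by omega
    rw [List.drop_eq_getElem_cons hsl] at hdrop
    obtain ⟨hx, hdrop'⟩ := List.cons_eq_cons.mp hdrop
    have hmod := PySem.Int.mod_eq_emod_of_pos (a := j - s) hc
    by_cases h : PySem.Int.mod s c = j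
    · -- picks x; the next strided index is s itself, then s + c
      have hsj : s % c = j := by rw [← PySem.Int.mod_eq_emod_of_pos hc]; exact h
      have hm0 : (j - s) % c = 0 := by
        rw [Int.sub_emod, hsj, Int.emod_eq_of_lt hj0 hjc, sub_self, Int.zero_emod]
      have hnxt : nxt c s j = s := by unfold nxt; rw [hmod, hm0]; ring
      obtain ⟨f, rfl⟩ : ∃ f, fuel = f + 1 := by
        cases fuel with
        | zero => exfalso; omega
        | succ f => exact ⟨f, rfl⟩
      rw [colc, if_pos h, hnxt, poCollect, if_pos hsl']
      have hget : (PySem.List.pyGet? a s).getD 0 = x := by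
        rw [PySem.List.pyGet?_eq_some_getElem a hs hsl']
        simp [hx]
      rw [hget]
      congr 1
      obtain ⟨k, hk⟩ : (c : Int) ∣ (j - s) := Int.dvd_of_emod_eq_zero hm0
      have hnxt' : nxt c (s + 1) j = s + c := by
        unfold nxt
        rw [PySem.Int.mod_eq_emod_of_pos hc]
        have h1 : j - (s + 1) = -1 + c * k := by rw [← hk]; ring
        have h2 : (c - 1) % c = c - 1 := Int.emod_eq_of_lt (by omega) (by omega)
        have h3 : (c - 1) % c = (-1 : Int) % c := by
          have he : (c : Int) - 1 = -1 + c * 1 := by ring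
          rw [he, Int.add_mul_emod_self_left]
        rw [h1, Int.add_mul_emod_self_left, ← h3, h2]; ring
      rw [← hnxt']
      exact ih (s + 1) f (by omega) (by rw [hdrop']; congr 1; omega) (by omega)
    · -- skips x; the next strided index is unchanged
      have hsj : ¬ s % c = j := by rw [← PySem.Int.mod_eq_emod_of_pos hc]; exact h
      have hm0 : ¬ (j - s) % c = 0 := by
        intro h0
        rw [Int.sub_emod, Int.emod_eq_of_lt hj0 hjc] at h0
        have hb1 : 0 ≤ s % c := Int.emod_nonneg s (by omega)
        have hb2 : s % c < c := Int.emod_lt_of_pos s hc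
        obtain ⟨k, hk⟩ := Int.dvd_of_emod_eq_zero h0
        have hk0 : k = 0 := by nlinarith
        rw [hk0, mul_zero] at hk
        exact hsj (by omega)
      have hm1 : 0 ≤ (j - s) % c := Int.emod_nonneg _ (by omega)
      have hm2 : (j - s) % c < c := Int.emod_lt_of_pos _ hc
      have hnxt' : nxt c (s + 1) j = nxt c s j := by
        unfold nxt
        rw [PySem.Int.mod_eq_emod_of_pos hc, hmod]
        have hd : (j - s) % c + c * ((j - s) / c) = j - s := Int.emod_add_mul_ediv (j - s) c
        have h1 : j - (s + 1) = ((j - s) % c - 1) + c * ((j - s) / c) := by omega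
        rw [h1, Int.add_mul_emod_self_left, Int.emod_eq_of_lt (by omega) (by omega)]
        ring
      rw [colc, if_neg h, ← hnxt']
      exact ih (s + 1) fuel (by omega) (by rw [hdrop']; congr 1; omega) (by omega)

theorem nxt_zero (c j : Int) (hj0 : 0 ≤ j) (hjc : j < c) : nxt c 0 j = j := by
  unfold nxt
  rw [PySem.Int.mod_eq_emod_of_pos (by omega : (0:Int) < c), sub_zero, Int.emod_eq_of_lt hj0 hjc]
  ring

-- ===== VERDICT (by name: the statement is the Claim_ definition above) =====
theorem po_spec : Claim_equal_po := by
  intro a r c _hdom _hpre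
  unfold Spec_po po po_alt
  by_cases hc : c ≤ 0
  · simp [hc, PySem.List.pyRange_one_eq_nil hc]
  · replace hc : 0 < c := by omega
    rw [if_neg (by omega)]
    rw [PySem.List.foldl_append_singleton_eq_map]
    apply List.map_congr_left
    intro j hj
    rw [PySem.List.mem_pyRange_one] at hj
    rw [dict_invariant, PySem.Dict.get?_empty,
        bridge a c j hc hj.1 hj.2 a 0 (a.length + 1) le_rfl (by simp) (by omega),
        nxt_zero c j hj.1 hj.2, runmax_eq_max?]
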